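-- pv_equiv track=rewrite | github.com/JelleKraaijeveld99/CSD2 | Python2a/eindopdracht/irregular_beat_generator.py | euclidean_gen
-- ===== SOURCE A (Python) =====
-- def euclidean_gen(num_pulses, num_notes, offset):
--     # calculate duration of a note, expressed in eight notes
--     note_dur = int(num_pulses / num_notes)
--     # fill list num_notes times with the duration value
--     sequence = [note_dur] * num_notes
--
--     rest_value = num_pulses - (num_notes * note_dur)
--     for i in range(rest_value):
--         sequence[i] += 1
--
--     #summing up all the notes and converting them to durations
--     timestamp_sequence = []
--     sum = 0
--     timestamp_sequence.append(0)
--     for x in range(len(sequence)-1):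
--         sum = int(sum) + int(sequence[x])
--         timestamp_sequence.append(sum)
--
--     #section for offset
--     timestamp_sequence = [x+offset for x in timestamp_sequence] #add the offset value to every dur in the list
--
--     #modulo all the new values in the list based on the maximum amount of possible notes
--     for i in range(len(timestamp_sequence)):
--         timestamp_sequence[i] = timestamp_sequence[i] % num_pulses
--
--     #sort all the values in the right order from low to high
--     timestamp_sequence.sort()
--     return timestamp_sequence
-- ===== SOURCE B (Python) =====
-- def euclidean_gen(num_pulses, num_notes, offset):
--     # Closed-form timestamps: note k starts at k*note_dur plus one extra pulse
--     # for each of the first rest_value (lengthened) notes before it.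
--     note_dur = int(num_pulses / num_notes)
--     rest_value = num_pulses - num_notes * note_dur
--     timestamps = [offset % num_pulses]  # note 0 always falls at the offset
--     for k in range(1, num_notes):
--         bump = min(k, rest_value) if rest_value > 0 else 0
--         timestamps.append((k * note_dur + bump + offset) % num_pulses)
--     timestamps.sort()
--     return timestamps
-- ===== Notes on version B (the rewrite author's own statement) =====
-- stated objective: simpler
-- what changed: B drops A's duration-list building, in-place bump loop, prefix-sum accumulation and in-place modulo loop, and instead emits each timestamp directly by the closed form (k*note_dur + min(k, rest_value) + offset) % num_pulses before sorting.
import Mathlib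
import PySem

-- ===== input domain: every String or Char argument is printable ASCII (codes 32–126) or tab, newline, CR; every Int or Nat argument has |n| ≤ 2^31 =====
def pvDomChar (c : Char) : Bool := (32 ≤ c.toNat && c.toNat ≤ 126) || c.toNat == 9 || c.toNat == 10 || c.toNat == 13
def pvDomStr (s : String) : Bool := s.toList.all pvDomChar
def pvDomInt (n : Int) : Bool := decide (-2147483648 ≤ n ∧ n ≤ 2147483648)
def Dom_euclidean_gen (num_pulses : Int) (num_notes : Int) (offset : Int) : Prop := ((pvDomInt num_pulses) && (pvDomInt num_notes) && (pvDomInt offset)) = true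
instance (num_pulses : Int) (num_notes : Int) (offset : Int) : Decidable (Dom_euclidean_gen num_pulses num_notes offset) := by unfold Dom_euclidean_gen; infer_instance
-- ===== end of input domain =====

-- B replaces A's duration-list building and prefix-sum accumulation by a per-note closed-form
-- timestamp (k*note_dur + min(k, rest_value)); objective: simpler.

-- ===== PORT A =====
-- int(num_pulses / num_notes) → PySem.Int.truncdiv (exact for |·| ≤ 2^31, well below the 2^53 float bound)
def euclidean_gen (num_pulses : Int) (num_notes : Int) (offset : Int) : List Int :=
  let note_dur := PySem.Int.truncdiv num_pulses num_notes
  let sequence := List.replicate num_notes.toNat note_dur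
  let rest_value := num_pulses - num_notes * note_dur
  let sequence := (PySem.List.pyRange 0 rest_value 1).foldl
      (fun s i => PySem.List.pySetD s i (PySem.List.pyGetD s i 0 + 1)) sequence
  let state := (PySem.List.pyRange 0 (PySem.List.len sequence - 1) 1).foldl
      (fun (acc : List Int × Int) x =>
        let sum := acc.2 + PySem.List.pyGetD sequence x 0
        (acc.1 ++ [sum], sum)) ([0], 0)
  let ts := state.1.map (fun x => x + offset)
  let ts := (PySem.List.pyRange 0 (PySem.List.len ts) 1).foldl
      (fun t i => PySem.List.pySetD t i (PySem.Int.mod (PySem.List.pyGetD t i 0) num_pulses)) ts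
  PySem.List.sorted ts (fun x => x) false

-- ===== PORT B =====
def euclidean_gen_alt (num_pulses : Int) (num_notes : Int) (offset : Int) : List Int :=
  let note_dur := PySem.Int.truncdiv num_pulses num_notes
  let rest_value := num_pulses - num_notes * note_dur
  let timestamps := (PySem.List.pyRange 1 num_notes 1).foldl
      (fun acc k =>
        acc ++ [PySem.Int.mod (k * note_dur + (if 0 < rest_value then min k rest_value else 0) + offset) num_pulses])
      [PySem.Int.mod offset num_pulses]
  PySem.List.sorted timestamps (fun x => x) false

-- ===== PRECONDITION & SPEC =====
-- Pre_ excludes exactly the inputs where A raises: num_notes = 0 (ZeroDivisionError in int(p/n)),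
-- num_pulses = 0 (ZeroDivisionError in the % loop), and num_notes < 0 with a positive truncation
-- remainder (IndexError: the bump loop indexes into the empty sequence).
def Pre_euclidean_gen (num_pulses : Int) (num_notes : Int) (offset : Int) : Prop :=
  num_notes ≠ 0 ∧ num_pulses ≠ 0 ∧
    (0 < num_notes ∨ num_pulses - num_notes * PySem.Int.truncdiv num_pulses num_notes ≤ 0)
instance (num_pulses : Int) (num_notes : Int) (offset : Int) : Decidable (Pre_euclidean_gen num_pulses num_notes offset) := by unfold Pre_euclidean_gen; infer_instance
def pvWitness_euclidean_gen : Int × Int × Int := (8, 3, 2)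

def Spec_euclidean_gen (num_pulses : Int) (num_notes : Int) (offset : Int) (out : List Int) : Prop := out = euclidean_gen_alt num_pulses num_notes offset
instance (num_pulses : Int) (num_notes : Int) (offset : Int) (out : List Int) : Decidable (Spec_euclidean_gen num_pulses num_notes offset out) := by unfold Spec_euclidean_gen; infer_instance

-- ===== CLAIM (what is proved, stated in full; the proofs are below) =====
def Claim_equal_euclidean_gen : Prop := ∀ (num_pulses : Int) (num_notes : Int) (offset : Int), Dom_euclidean_gen num_pulses num_notes offset → Pre_euclidean_gen num_pulses num_notes offset → Spec_euclidean_gen num_pulses num_notes offset (euclidean_gen num_pulses num_notes offset)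

-- ===== LEMMAS AND PROOFS =====

def pvPrefix (s : Int) : List Int → List Int
  | [] => []
  | v :: t => (s + v) :: pvPrefix (s + v) t

lemma pvPrefix_length (s : Int) (l : List Int) : (pvPrefix s l).length = l.length := by
  induction l generalizing s with
  | nil => rfl
  | cons v t ih => simp [pvPrefix, ih]

lemma pvPrefix_getElem (s : Int) (l : List Int) (k : Nat) (h : k < l.length) :
    (pvPrefix s l)[k]'(by rwa [pvPrefix_length]) = s + (l.take (k + 1)).sum := by
  induction l generalizing s k with
  | nil => simp at h
  | cons v t ih =>
    cases k with
    | zero => simp [pvPrefix]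
    | succ k =>
      simp only [pvPrefix, List.getElem_cons_succ, List.take_succ_cons, List.sum_cons]
      rw [ih]
      · ring
      · simpa using h

lemma pv_sum_fold (l : List Int) (acc : List Int) (s : Int) :
    (l.foldl (fun (ac : List Int × Int) v => (ac.1 ++ [ac.2 + v], ac.2 + v)) (acc, s))
      = (acc ++ pvPrefix s l, s + l.sum) := by
  induction l generalizing acc s with
  | nil => simp [pvPrefix]
  | cons v t ih => simp [pvPrefix, ih, add_assoc]

lemma pv_bump_fold (d : Int) (m r j : Nat) (hj : j ≤ r) (hr : r ≤ m) :
    (PySem.List.pyRange (j : Int) (r : Int) 1).foldl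
        (fun s i => PySem.List.pySetD s i (PySem.List.pyGetD s i 0 + 1))
        (List.replicate j (d + 1) ++ List.replicate (m - j) d)
      = List.replicate r (d + 1) ++ List.replicate (m - r) d := by
  induction hd : r - j generalizing j with
  | zero =>
    have : j = r := by omega
    subst this
    rw [PySem.List.pyRange_one_eq_nil (by omega)]
    rfl
  | succ k ih =>
    have hjr : j < r := by omega
    rw [PySem.List.pyRange_one_cons (by exact_mod_cast hjr)]
    simp only [List.foldl_cons]
    have hd1 : m - j = (m - j - 1) + 1 := by omega
    have h1 : PySem.List.pyGetD (List.replicate j (d + 1) ++ List.replicate (m - j) d) (j : Int) 0 = d := by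
      rw [PySem.List.pyGetD_natCast]
      rw [hd1, List.replicate_succ]
      simp
    have h2 : PySem.List.pySetD (List.replicate j (d + 1) ++ List.replicate (m - j) d) (j : Int) (d + 1)
        = List.replicate (j + 1) (d + 1) ++ List.replicate (m - (j + 1)) d := by
      rw [PySem.List.pySetD_natCast]
      rw [hd1, List.replicate_succ, List.set_append]
      simp [List.replicate_succ' (n := j)]
      omega
    rw [h1, h2]
    have e1 : (j : Int) + 1 = ((j + 1 : Nat) : Int) := by push_cast; ring
    rw [e1, ih (j + 1) (by omega) (by omega)]

lemma pv_set_map (f : Int → Int) (rest : List Int) (done : List Int) :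
    (PySem.List.pyRange (done.length : Int) ((done.length : Int) + (rest.length : Int)) 1).foldl
        (fun t i => PySem.List.pySetD t i (f (PySem.List.pyGetD t i 0))) (done ++ rest)
      = done ++ rest.map f := by
  induction rest generalizing done with
  | nil => simp [PySem.List.pyRange_one_eq_nil]
  | cons v t ih =>
    rw [PySem.List.pyRange_one_cons (by push_cast [List.length_cons]; omega)]
    simp only [List.foldl_cons]
    have h1 : PySem.List.pyGetD (done ++ v :: t) (done.length : Int) 0 = v := by
      simp [PySem.List.pyGetD_natCast]
    have h2 : PySem.List.pySetD (done ++ v :: t) (done.length : Int) (f v)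
        = (done ++ [f v]) ++ t := by
      simp [PySem.List.pySetD_natCast, List.append_assoc]
    rw [h1, h2]
    have e1 : ((done.length : Int) + 1) = (((done ++ [f v]).length : Nat) : Int) := by
      simp
    have e2 : (done.length : Int) + ((v :: t).length : Int)
        = (((done ++ [f v]).length : Nat) : Int) + (t.length : Int) := by
      push_cast [List.length_cons, List.length_append, List.length_nil]; ring
    rw [e1, e2, ih (done ++ [f v])]
    simp

lemma pv_set_map_zero (f : Int → Int) (l : List Int) :
    (PySem.List.pyRange 0 (l.length : Int) 1).foldl
        (fun t i => PySem.List.pySetD t i (f (PySem.List.pyGetD t i 0))) l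
      = l.map f := by
  have := pv_set_map f l []
  simpa using this

lemma pv_take_sum (d : Int) (m r j : Nat) (hr : r ≤ m) (hj : j ≤ m) :
    ((List.replicate r (d + 1) ++ List.replicate (m - r) d).take j).sum
      = j * d + (min j r : Nat) := by
  rw [List.take_append, List.take_replicate, List.take_replicate]
  simp only [List.sum_append, List.sum_replicate, List.length_replicate, nsmul_eq_mul]
  have h1 : min (j - r) (m - r) = j - r := by omega
  rw [h1]
  rcases le_total j r with h | h
  · have h2 : min j r = j := by omega
    have h3 : j - r = 0 := by omega
    rw [h2, h3]
    push_cast; ring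
  · have h2 : min j r = r := by omega
    rw [h2]
    have h4 : ((j - r : Nat) : Int) = (j : Int) - (r : Int) := by push_cast [Nat.cast_sub h]; ring
    rw [h4]; ring


lemma pv_key (d rest : Int) (m r' : Nat) (hm1 : 1 ≤ m) (hrm : r' ≤ m)
    (hrn : rest ≤ 0 → r' = 0) (hrp : 0 < rest → rest = (r' : Int)) :
    (0 : Int) :: pvPrefix 0 ((List.replicate r' (d + 1) ++ List.replicate (m - r') d).take (m - 1))
      = (PySem.List.pyRange 0 (m : Int) 1).map
          (fun k => k * d + (if 0 < rest then min k rest else 0)) := by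
  have hlenseq : (List.replicate r' (d + 1) ++ List.replicate (m - r') d).length = m := by
    simp; omega
  apply List.ext_getElem
  · simp [pvPrefix_length, List.length_take, PySem.List.length_pyRange_one, hlenseq]
    omega
  · intro k h1 h2
    have hkm : k < m := by
      simpa [PySem.List.length_pyRange_one] using h2
    rw [List.getElem_map, PySem.List.getElem_pyRange_one]
    cases k with
    | zero =>
      simp only [List.getElem_cons_zero]
      rcases le_or_gt rest 0 with h | h
      · rw [if_neg (by omega)]; ring
      · rw [if_pos h, min_eq_left (by omega)]; push_cast; ring
    | succ k =>
      rw [List.getElem_cons_succ]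
      have hkt : k < ((List.replicate r' (d + 1) ++ List.replicate (m - r') d).take (m - 1)).length := by
        simp [List.length_take, hlenseq]; omega
      rw [pvPrefix_getElem _ _ _ hkt]
      rw [List.take_take]
      have hmin : min (k + 1) (m - 1) = k + 1 := by omega
      rw [hmin, pv_take_sum d m r' (k + 1) hrm (by omega)]
      rcases le_or_gt rest 0 with h | h
      · have h0 : r' = 0 := hrn h
        rw [if_neg (by omega)]
        simp only [h0, Nat.min_zero, Nat.cast_zero, add_zero]
        push_cast; ring
      · rw [if_pos h, hrp h]
        push_cast [Nat.cast_min]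
        ring

theorem pv_main (num_pulses num_notes offset : Int)
    (hn0 : num_notes ≠ 0) (hp0 : num_pulses ≠ 0)
    (hor : 0 < num_notes ∨ num_pulses - num_notes * PySem.Int.truncdiv num_pulses num_notes ≤ 0) :
    euclidean_gen num_pulses num_notes offset = euclidean_gen_alt num_pulses num_notes offset := by
  have hrest : num_pulses - num_notes * PySem.Int.truncdiv num_pulses num_notes
      = num_pulses.tmod num_notes := by
    have := Int.tmod_def num_pulses num_notes
    simp only [PySem.Int.truncdiv]
    omega
  set d := PySem.Int.truncdiv num_pulses num_notes with hd
  set rest := num_pulses - num_notes * d with hrestdef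
  rcases lt_or_gt_of_ne hn0 with hn | hn
  · -- num_notes < 0 : sequence is empty, A returns the single unconditional timestamp
    have hrle : rest ≤ 0 := by
      rcases hor with h | h
      · omega
      · exact h
    have htn : num_notes.toNat = 0 := by omega
    dsimp only [euclidean_gen, euclidean_gen_alt]
    rw [← hd, ← hrestdef, htn]
    rw [PySem.List.pyRange_one_eq_nil hrle, PySem.List.pyRange_one_eq_nil (b := num_notes) (by omega)]
    simp [PySem.List.pyRange_one_eq_nil]
    rw [show PySem.List.pyRange (0:Int) 1 1 = [0] from by decide]
    simp [PySem.List.pyGetD_zero_cons, PySem.List.pySetD_of_nonneg]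
  · -- 0 < num_notes
    set m := num_notes.toNat with hm
    have hmn : (m : Int) = num_notes := Int.toNat_of_nonneg (by omega)
    have hm1 : 1 ≤ m := by omega
    set r' := rest.toNat with hr'd
    have hrm : r' ≤ m := by
      rcases le_total 0 num_pulses with hp | hp
      · have h1 : num_pulses.tmod num_notes < num_notes := Int.tmod_lt_of_pos _ hn
        have h2 : 0 ≤ num_pulses.tmod num_notes := Int.tmod_nonneg _ hp
        omega
      · have h3 : (-num_pulses).tmod num_notes = -(num_pulses.tmod num_notes) := Int.neg_tmod _ _
        have h2 : 0 ≤ (-num_pulses).tmod num_notes := Int.tmod_nonneg _ (by omega)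
        omega
    have hrn : rest ≤ 0 → r' = 0 := fun h => by omega
    have hrp : 0 < rest → rest = (r' : Int) := fun h => by omega
    dsimp only [euclidean_gen, euclidean_gen_alt]
    rw [← hd, ← hrestdef, ← hm]
    set seq := List.replicate r' (d + 1) ++ List.replicate (m - r') d with hseqd
    have hseq : (PySem.List.pyRange 0 rest 1).foldl
        (fun s i => PySem.List.pySetD s i (PySem.List.pyGetD s i 0 + 1)) (List.replicate m d)
        = seq := by
      rcases le_or_gt rest 0 with h | h
      · rw [PySem.List.pyRange_one_eq_nil h]
        have h0 : r' = 0 := hrn h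
        simp [hseqd, h0]
      · rw [hrp h]
        have := pv_bump_fold d m r' 0 (Nat.zero_le _) hrm
        simpa using this
    rw [hseq]
    have hlenseq : seq.length = m := by simp [hseqd]; omega
    rw [PySem.List.len_eq, hlenseq]
    have hbound : (m : Int) - 1 = ((m - 1 : Nat) : Int) := by omega
    rw [hbound]
    set seq' := seq.take (m - 1) with hseq'd
    have hlen' : seq'.length = m - 1 := by simp [hseq'd, hlenseq]
    -- replace pyGetD seq by pyGetD seq' inside the accumulation loop
    rw [PySem.List.foldl_congr_mem _ _
      (fun (acc : List Int × Int) x => (acc.1 ++ [acc.2 + PySem.List.pyGetD seq' x 0],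
        acc.2 + PySem.List.pyGetD seq' x 0)) _
      (by
        intro acc x hx
        dsimp only
        rw [PySem.List.mem_pyRange_one] at hx
        have hx1 : x < ((m - 1 : Nat) : Int) := hx.2
        have hxs : x < (seq.length : Int) := by omega
        have hxs' : x < (seq'.length : Int) := by omega
        rw [PySem.List.pyGetD_eq_getElem seq 0 hx.1 (by omega),
            PySem.List.pyGetD_eq_getElem seq' 0 hx.1 (by omega)]
        simp only [hseq'd, List.getElem_take])]
    rw [show ((m - 1 : Nat) : Int) = (seq'.length : Int) by rw [hlen']]
    rw [PySem.List.foldl_pyRange_zero_pyGetD' seq' 0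
      (fun (ac : List Int × Int) v => (ac.1 ++ [ac.2 + v], ac.2 + v)) ([0], 0)]
    rw [pv_sum_fold]
    dsimp only
    rw [List.singleton_append]
    rw [pv_key d rest m r' hm1 hrm hrn hrp]
    rw [PySem.List.len_eq]
    rw [pv_set_map_zero (fun x => PySem.Int.mod x num_pulses)]
    rw [PySem.List.foldl_append_singleton_eq_map]
    rw [← hmn]
    rw [PySem.List.pyRange_one_cons (a := (0:Int)) (by omega)]
    have h00 : (if 0 < rest then min (0:Int) rest else 0) = 0 := by
      split_ifs with h <;> omega
    simp only [List.map_map, List.map_cons, zero_add, zero_mul,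
      List.singleton_append, h00, Function.comp_def]

-- ===== VERDICT (by name: the statement is the Claim_ definition above) =====
theorem euclidean_gen_spec : Claim_equal_euclidean_gen := by
  intro num_pulses num_notes offset _ hpre
  unfold Spec_euclidean_gen
  exact pv_main num_pulses num_notes offset hpre.1 hpre.2.1 hpre.2.2
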